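-- pv_equiv track=rewrite | github.com/dxkkxn/ensimag | second_year/S2/openGL/volcano/project3d/tree.py | _is_leaf
-- ===== SOURCE A (Python) =====
-- def _is_leaf(i, l_system):
--     i += 1
--     flag = True
--     stack = 0
--     while i < len(l_system) and flag:
--         match l_system[i]:
--             case "F":
--                 flag = False
--             case "]":
--                 if stack == 0:
--                     break;
--                 stack -= 1
--             case "[":
--                 stack += 1
--         i += 1
--     return flag
-- ===== SOURCE B (Python) =====
-- def _is_leaf(i, l_system):
--     n = len(l_system)
--     depth = 0
--     end = n
--     j = i + 1
--     while j < n: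
--         c = l_system[j]
--         if c == "]":
--             if depth == 0:
--                 end = j
--                 break
--             depth -= 1
--         elif c == "[":
--             depth += 1
--         j += 1
--     return all(l_system[k] != "F" for k in range(i + 1, end))
-- ===== Notes on version B (the rewrite author's own statement) =====
-- stated objective: alternative
-- what changed: Replaces A's single fused scan (flag + bracket depth + break in one while) with two separate passes: a boundary-finding loop that computes the exclusive index of the first depth-0 ']' , then an independent membership test for 'F' over that segment.
import Mathlib
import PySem

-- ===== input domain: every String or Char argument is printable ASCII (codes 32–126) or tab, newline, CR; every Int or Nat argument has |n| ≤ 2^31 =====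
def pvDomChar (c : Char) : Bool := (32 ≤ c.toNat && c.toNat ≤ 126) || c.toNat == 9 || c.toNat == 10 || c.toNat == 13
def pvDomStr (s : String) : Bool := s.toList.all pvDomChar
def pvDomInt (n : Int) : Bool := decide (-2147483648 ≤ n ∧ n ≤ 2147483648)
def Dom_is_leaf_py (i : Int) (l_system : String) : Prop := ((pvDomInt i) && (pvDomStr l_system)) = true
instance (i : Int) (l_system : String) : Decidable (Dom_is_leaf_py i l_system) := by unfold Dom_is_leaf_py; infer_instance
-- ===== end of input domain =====

-- B separates A's fused scan into a boundary-finding pass plus an independent 'F'-membership pass (alternative decomposition, same cost).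


-- ===== PORT A =====
-- A's while loop: state (i, flag, stack); fuel = number of remaining indices before len.
def isLeafLoopA (fuel : Nat) (i : Int) (s : List Char) (flag : Bool) (stack : Int) : Bool :=
  match fuel with
  | 0 => flag
  | fuel + 1 =>
    if i < (s.length : Int) ∧ flag = true then
      match PySem.List.pyGet? s i with
      | none => flag  -- IndexError in Python; excluded by Pre_
      | some c =>
        if c = 'F' then isLeafLoopA fuel (i + 1) s false stack
        else if c = ']' then
          (if stack = 0 then flag else isLeafLoopA fuel (i + 1) s flag (stack - 1))
        else if c = '[' then isLeafLoopA fuel (i + 1) s flag (stack + 1)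
        else isLeafLoopA fuel (i + 1) s flag stack
    else flag

def is_leaf_py (i : Int) (l_system : String) : Bool :=
  let s := l_system.toList
  isLeafLoopA ((s.length : Int) - (i + 1)).toNat (i + 1) s true 0

-- ===== PORT B =====
-- B pass 1: exclusive index of the first ']' seen at bracket depth 0 (len if none).
def findEndB (fuel : Nat) (j : Int) (s : List Char) (depth : Int) : Int :=
  match fuel with
  | 0 => (s.length : Int)
  | fuel + 1 =>
    if j < (s.length : Int) then
      match PySem.List.pyGet? s j with
      | none => (s.length : Int)  -- IndexError in Python; excluded by Pre_
      | some c =>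
        if c = ']' then (if depth = 0 then j else findEndB fuel (j + 1) s (depth - 1))
        else if c = '[' then findEndB fuel (j + 1) s (depth + 1)
        else findEndB fuel (j + 1) s depth
    else (s.length : Int)

def is_leaf_py_alt (i : Int) (l_system : String) : Bool :=
  let s := l_system.toList
  let e := findEndB ((s.length : Int) - (i + 1)).toNat (i + 1) s 0
  -- B pass 2: all(l_system[k] != "F" for k in range(i+1, e))
  (PySem.List.pyRange (i + 1) e 1).all (fun k => !(PySem.List.pyGet? s k == some 'F'))

-- ===== PRECONDITION & SPEC =====
-- Pre_ excludes exactly the inputs where Python A raises IndexError (first accessed index i+1 below -len).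
def Pre_is_leaf_py (i : Int) (l_system : String) : Prop :=
  -(l_system.length : Int) ≤ i + 1
instance (i : Int) (l_system : String) : Decidable (Pre_is_leaf_py i l_system) := by unfold Pre_is_leaf_py; infer_instance

def pvWitness_is_leaf_py : Int × String := (0, "[X]F")

def Spec_is_leaf_py (i : Int) (l_system : String) (out : Bool) : Prop := out = is_leaf_py_alt i l_system
instance (i : Int) (l_system : String) (out : Bool) : Decidable (Spec_is_leaf_py i l_system out) := by unfold Spec_is_leaf_py; infer_instance

-- ===== CLAIM (what is proved, stated in full; the proofs are below) =====
def Claim_equal_is_leaf_py : Prop := ∀ (i : Int) (l_system : String), Dom_is_leaf_py i l_system → Pre_is_leaf_py i l_system → Spec_is_leaf_py i l_system (is_leaf_py i l_system)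

-- ===== LEMMAS AND PROOFS =====

-- A's loop with flag already false returns false immediately.
theorem isLeafLoopA_false (fuel : Nat) (j : Int) (s : List Char) (st : Int) :
    isLeafLoopA fuel j s false st = false := by
  cases fuel <;> simp [isLeafLoopA]

-- B's boundary index is ≥ the start index, or equals the length.
theorem findEndB_ge (fuel : Nat) (j : Int) (s : List Char) (st : Int) :
    j ≤ findEndB fuel j s st ∨ findEndB fuel j s st = (s.length : Int) := by
  induction fuel generalizing j st with
  | zero => right; rfl
  | succ fuel ih =>
    rw [findEndB]
    by_cases hj : j < (s.length : Int)
    · rw [if_pos hj]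
      cases hc : PySem.List.pyGet? s j with
      | none => right; rfl
      | some c =>
        dsimp only
        by_cases h1 : c = ']'
        · rw [if_pos h1]
          by_cases h2 : st = 0
          · rw [if_pos h2]; left; omega
          · rw [if_neg h2]
            rcases ih (j + 1) (st - 1) with h | h
            · left; omega
            · right; exact h
        · rw [if_neg h1]
          by_cases h3 : c = '['
          · rw [if_pos h3]
            rcases ih (j + 1) (st + 1) with h | h
            · left; omega
            · right; exact h
          · rw [if_neg h3]
            rcases ih (j + 1) st with h | h
            · left; omega
            · right; exact h
    · rw [if_neg hj]; right; rfl

-- In-range indices yield a character.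
theorem pyGet?_isSome_of_range (s : List Char) (j : Int)
    (h1 : -(s.length : Int) ≤ j) (h2 : j < (s.length : Int)) :
    ∃ c, PySem.List.pyGet? s j = some c := by
  cases hc : PySem.List.pyGet? s j with
  | some c => exact ⟨c, rfl⟩
  | none =>
    rw [PySem.List.pyGet?_eq_none_iff] at hc
    exact absurd ⟨h1, h2⟩ hc

-- Main invariant: A's fused scan equals B's boundary pass followed by the membership pass.
theorem fused_eq_two_pass (fuel : Nat) (s : List Char) (j st : Int)
    (hlo : -(s.length : Int) ≤ j) (hf : (s.length : Int) ≤ j + fuel) :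
    isLeafLoopA fuel j s true st =
      (PySem.List.pyRange j (findEndB fuel j s st) 1).all
        (fun k => !(PySem.List.pyGet? s k == some 'F')) := by
  induction fuel generalizing j st with
  | zero =>
    simp only [isLeafLoopA, findEndB]
    rw [PySem.List.pyRange_one_eq_nil (by omega)]
    rfl
  | succ fuel ih =>
    rw [isLeafLoopA, findEndB]
    by_cases hj : j < (s.length : Int)
    · obtain ⟨c, hc⟩ := pyGet?_isSome_of_range s j hlo hj
      have hcons : ∀ e : Int, (j + 1 ≤ e ∨ e = (s.length : Int)) →
          (PySem.List.pyRange j e 1).all (fun k => !(PySem.List.pyGet? s k == some 'F')) =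
            ((!(PySem.List.pyGet? s j == some 'F')) &&
              (PySem.List.pyRange (j + 1) e 1).all (fun k => !(PySem.List.pyGet? s k == some 'F'))) := by
        intro e he
        rw [PySem.List.pyRange_one_cons (by omega), List.all_cons]
      rw [if_pos (⟨hj, rfl⟩ : j < (s.length : Int) ∧ true = true), if_pos hj, hc]
      dsimp only
      by_cases h1 : c = 'F'
      · simp only [if_pos h1, if_neg (show ¬ c = ']' by rw [h1]; decide),
          if_neg (show ¬ c = '[' by rw [h1]; decide), isLeafLoopA_false]
        rw [hcons _ (findEndB_ge fuel (j + 1) s st), hc, h1]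
        simp
      · simp only [if_neg h1]
        by_cases h2 : c = ']'
        · simp only [if_pos h2]
          by_cases h3 : st = 0
          · simp only [if_pos h3]
            rw [PySem.List.pyRange_one_eq_nil (by omega)]
            rfl
          · simp only [if_neg h3]
            rw [hcons _ (findEndB_ge fuel (j + 1) s (st - 1)), hc,
              ih (j + 1) (st - 1) (by omega) (by omega)]
            simp [h1]
        · simp only [if_neg h2]
          by_cases h3 : c = '['
          · simp only [if_pos h3]
            rw [hcons _ (findEndB_ge fuel (j + 1) s (st + 1)), hc,
              ih (j + 1) (st + 1) (by omega) (by omega)]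
            simp [h1]
          · simp only [if_neg h3]
            rw [hcons _ (findEndB_ge fuel (j + 1) s st), hc,
              ih (j + 1) st (by omega) (by omega)]
            simp [h1]
    · rw [if_neg (fun h => hj h.1), if_neg hj,
        PySem.List.pyRange_one_eq_nil (by omega)]
      rfl

-- ===== VERDICT (by name: the statement is the Claim_ definition above) =====
theorem is_leaf_py_spec : Claim_equal_is_leaf_py := by
  intro i l hdom hpre
  unfold Spec_is_leaf_py is_leaf_py is_leaf_py_alt
  exact fused_eq_two_pass _ _ _ _ hpre (by omega)
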